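-- pv_equiv track=rewrite | github.com/Dr0x3525/Proyecto-final-programacion | ejercicios_parciales/ejercicios_parcial_3/ejercicio_3.py | encontrar_indice_segundo_primo_y_cuarto_primo_del_vector
-- ===== SOURCE A (Python) =====
-- def Comprobar_ser_primo(numero):
--     numero = int(numero)
--     if numero <= 1:
--         return False
--     else:
--         if numero == 2:
--             return True
--         else:
--             for i in range(2,numero-1):
--                 if numero % i  == 0:
--                     return False
--             return True
--
-- def encontrar_indice_segundo_primo_y_cuarto_primo_del_vector(vector):
--     contador_primos = 0
--     for indice in range(len(vector)):
--         numero = vector[indice]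
--         if Comprobar_ser_primo(numero):
--             contador_primos += 1
--             if contador_primos == 2:
--                 indice_segundo_primo = indice
--             if contador_primos == 4:
--                 indice_cuarto_primo = indice
--                 return indice_segundo_primo,indice_cuarto_primo
--     return None,None
-- ===== SOURCE B (Python) =====
-- def _es_primo(n):
--     n = int(n)
--     if n < 2:
--         return False
--     d = 2
--     while d * d <= n:
--         if n % d == 0:
--             return False
--         d += 1
--     return True
--
-- def encontrar_indice_segundo_primo_y_cuarto_primo_del_vector(vector):
--     indices = []
--     for i, x in enumerate(vector):
--         if _es_primo(x):
--             indices.append(i)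
--             if len(indices) == 4:
--                 return indices[1], indices[3]
--     return None, None
-- ===== Notes on version B (the rewrite author's own statement) =====
-- stated objective: alternative
-- what changed: Primality is tested by trial division only up to sqrt(n) instead of up to n-2, and the scan keeps a list of found prime indices instead of a counter plus two named variables.
import Mathlib
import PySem

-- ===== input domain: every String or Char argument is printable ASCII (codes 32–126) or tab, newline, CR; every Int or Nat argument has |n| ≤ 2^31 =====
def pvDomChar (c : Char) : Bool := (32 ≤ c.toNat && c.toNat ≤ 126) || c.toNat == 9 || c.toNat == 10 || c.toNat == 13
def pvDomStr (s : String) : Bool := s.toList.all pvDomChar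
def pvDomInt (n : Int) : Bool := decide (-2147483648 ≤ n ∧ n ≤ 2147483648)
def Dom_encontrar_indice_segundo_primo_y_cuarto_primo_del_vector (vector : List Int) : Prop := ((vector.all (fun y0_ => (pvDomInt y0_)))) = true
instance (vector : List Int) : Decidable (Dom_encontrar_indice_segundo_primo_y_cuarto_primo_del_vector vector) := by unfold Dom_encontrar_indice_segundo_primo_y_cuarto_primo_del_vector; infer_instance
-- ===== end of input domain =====

-- B replaces A's trial division up to n-2 by trial division up to sqrt(n), and the scan
-- keeps a list of found prime indices instead of a counter and two named slots.

-- ===== PORT A =====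
-- for i in range(2, numero-1): if numero % i == 0: return False / True after the loop
def primoLoopA (numero i : Int) : Bool :=
  if i < numero - 1 then
    if PySem.Int.mod numero i == 0 then false else primoLoopA numero (i + 1)
  else true
termination_by (numero - 1 - i).toNat
decreasing_by omega

def Comprobar_ser_primo (numero : Int) : Bool :=
  if numero ≤ 1 then false
  else if numero == 2 then true
  else primoLoopA numero 2

-- the for loop over range(len(vector)); state = (contador_primos, indice_segundo_primo)
def mainLoopA : List Int → Int → Int → Option Int → Option Int × Option Int
  | [], _, _, _ => (none, none)
  | numero :: rest, indice, contador, idx2 =>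
    if Comprobar_ser_primo numero then
      let contador' := contador + 1
      let idx2' := if contador' == 2 then some indice else idx2
      if contador' == 4 then (idx2', some indice)
      else mainLoopA rest (indice + 1) contador' idx2'
    else mainLoopA rest (indice + 1) contador idx2

def encontrar_indice_segundo_primo_y_cuarto_primo_del_vector (vector : List Int) : Option Int × Option Int :=
  mainLoopA vector 0 0 none

-- ===== PORT B =====
-- while d*d <= n: if n % d == 0: return False; d += 1
def primoLoopB (n d : Int) : Bool :=
  if d * d ≤ n then
    if PySem.Int.mod n d == 0 then false else primoLoopB n (d + 1)
  else true
termination_by (n + 1 - d).toNat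
decreasing_by
  rename_i h _
  have hd : d ≤ n := by nlinarith [sq_nonneg (d - 1), mul_self_nonneg d]
  omega

def esPrimo (n : Int) : Bool :=
  if n < 2 then false else primoLoopB n 2

-- the for loop over enumerate(vector); state = indices (list of prime positions found so far)
def mainLoopB : List Int → Int → List Int → Option Int × Option Int
  | [], _, _ => (none, none)
  | x :: rest, i, indices =>
    if esPrimo x then
      let indices' := indices ++ [i]
      if indices'.length == 4 then (indices'[1]?, indices'[3]?)
      else mainLoopB rest (i + 1) indices'
    else mainLoopB rest (i + 1) indices

def encontrar_indice_segundo_primo_y_cuarto_primo_del_vector_alt (vector : List Int) : Option Int × Option Int :=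
  mainLoopB vector 0 []

-- ===== PRECONDITION & SPEC =====
def Spec_encontrar_indice_segundo_primo_y_cuarto_primo_del_vector (vector : List Int) (out : Option Int × Option Int) : Prop := out = encontrar_indice_segundo_primo_y_cuarto_primo_del_vector_alt vector
instance (vector : List Int) (out : Option Int × Option Int) : Decidable (Spec_encontrar_indice_segundo_primo_y_cuarto_primo_del_vector vector out) := by unfold Spec_encontrar_indice_segundo_primo_y_cuarto_primo_del_vector; infer_instance

-- ===== CLAIM (what is proved, stated in full; the proofs are below) =====
def Claim_equal_encontrar_indice_segundo_primo_y_cuarto_primo_del_vector : Prop := ∀ (vector : List Int), Dom_encontrar_indice_segundo_primo_y_cuarto_primo_del_vector vector → Spec_encontrar_indice_segundo_primo_y_cuarto_primo_del_vector vector (encontrar_indice_segundo_primo_y_cuarto_primo_del_vector vector)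

-- ===== LEMMAS AND PROOFS =====

-- A's inner loop returns true iff no divisor in [i, n-1)
theorem primoLoopA_eq_true_iff (numero i : Int) :
    primoLoopA numero i = true ↔ ∀ d : Int, i ≤ d → d < numero - 1 → ¬ d ∣ numero := by
  rw [primoLoopA]
  split
  · rename_i hlt
    split
    · rename_i hmod
      simp only [beq_iff_eq, PySem.Int.mod_eq_zero_iff_dvd] at hmod
      refine iff_of_false (by simp) fun hall => hall i le_rfl hlt hmod
    · rename_i hmod
      simp only [beq_iff_eq, PySem.Int.mod_eq_zero_iff_dvd] at hmod
      rw [primoLoopA_eq_true_iff numero (i + 1)]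
      constructor
      · intro h d hd1 hd2
        rcases eq_or_lt_of_le hd1 with h' | h'
        · exact h' ▸ hmod
        · exact h d (by omega) hd2
      · intro h d hd1 hd2
        exact h d (by omega) hd2
  · rename_i hlt
    simp only [true_iff]
    intro d hd1 hd2
    omega
termination_by (numero - 1 - i).toNat
decreasing_by omega

-- B's inner loop returns true iff no divisor d ≥ start with d*d ≤ n (start ≥ 1)
theorem primoLoopB_eq_true_iff (n i : Int) (hi : 1 ≤ i) :
    primoLoopB n i = true ↔ ∀ d : Int, i ≤ d → d * d ≤ n → ¬ d ∣ n := by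
  rw [primoLoopB]
  split
  · rename_i hle
    have h0 : 0 ≤ n := le_trans (mul_self_nonneg i) hle
    have hdn : i ≤ n := by nlinarith [sq_nonneg (i - 1)]
    split
    · rename_i hmod
      simp only [beq_iff_eq, PySem.Int.mod_eq_zero_iff_dvd] at hmod
      refine iff_of_false (by simp) fun hall => hall i le_rfl hle hmod
    · rename_i hmod
      simp only [beq_iff_eq, PySem.Int.mod_eq_zero_iff_dvd] at hmod
      rw [primoLoopB_eq_true_iff n (i + 1) (by omega)]
      constructor
      · intro h d hd1 hd2
        rcases eq_or_lt_of_le hd1 with h' | h'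
        · exact h' ▸ hmod
        · exact h d (by omega) hd2
      · intro h d hd1 hd2
        exact h d (by omega) hd2
  · rename_i hle
    simp only [true_iff]
    intro d hd1 hd2
    exact absurd hd2 (by nlinarith)
termination_by (n + 1 - i).toNat
decreasing_by
  omega

-- the two primality tests agree on every Int
theorem primo_eq (n : Int) : Comprobar_ser_primo n = esPrimo n := by
  unfold Comprobar_ser_primo esPrimo
  by_cases h1 : n ≤ 1
  · simp [h1, show n < 2 by omega]
  · by_cases h2 : n = 2
    · subst h2
      rw [primoLoopB]
      norm_num
    · have h3 : 3 ≤ n := by omega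
      simp only [if_neg h1, if_neg (show ¬ ((n == 2) = true) by simp [h2]),
        if_neg (show ¬ n < 2 by omega)]
      rw [Bool.eq_iff_iff, primoLoopA_eq_true_iff, primoLoopB_eq_true_iff n 2 (by omega)]
      constructor
      · -- no divisor below n-1 ⇒ no divisor up to √n
        intro h d hd1 hd2 hdvd
        exact h d hd1 (by nlinarith) hdvd
      · -- no divisor up to √n ⇒ no divisor below n-1
        intro h d hd1 hd2 hdvd
        by_cases hsq : d * d ≤ n
        · exact h d hd1 hsq hdvd
        · -- the cofactor k = n / d satisfies 2 ≤ k and k*k ≤ n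
          obtain ⟨k, hk⟩ := hdvd
          have hdpos : 0 < d := by omega
          have hk1 : 1 ≤ k := by nlinarith
          have hk2 : 2 ≤ k := by
            rcases eq_or_lt_of_le hk1 with h' | h'
            · exfalso; rw [← h', mul_one] at hk; omega
            · omega
          have hkk : k * k ≤ n := by nlinarith
          exact h k hk2 hkk ⟨d, by rw [hk]; ring⟩

-- main-loop invariant: A's (contador, idx2) corresponds to B's index list
theorem mainLoop_eq (l : List Int) (i : Int) (acc : List Int) (h : acc.length < 4) :
    mainLoopA l i (acc.length : Int) acc[1]? = mainLoopB l i acc := by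
  induction l generalizing i acc with
  | nil => rfl
  | cons x rest ih =>
    rw [mainLoopA, mainLoopB, primo_eq]
    by_cases hp : esPrimo x = true
    · simp only [hp, if_true]
      rcases acc with _ | ⟨a, _ | ⟨b, _ | ⟨c, _ | ⟨d, t⟩⟩⟩⟩
      · simpa using ih (i + 1) [i] (by simp)
      · simpa using ih (i + 1) [a, i] (by simp)
      · simpa using ih (i + 1) [a, b, i] (by simp)
      · simp
      · exact absurd h (by simp)
    · rw [if_neg hp, if_neg hp]
      exact ih (i + 1) acc h

-- ===== VERDICT (by name: the statement is the Claim_ definition above) =====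
theorem encontrar_indice_segundo_primo_y_cuarto_primo_del_vector_spec : Claim_equal_encontrar_indice_segundo_primo_y_cuarto_primo_del_vector := by
  intro vector _
  unfold Spec_encontrar_indice_segundo_primo_y_cuarto_primo_del_vector
  unfold encontrar_indice_segundo_primo_y_cuarto_primo_del_vector encontrar_indice_segundo_primo_y_cuarto_primo_del_vector_alt
  simpa using mainLoop_eq vector 0 [] (by simp)
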